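-- pv_equiv track=rewrite | github.com/sam-lee-n/AdventOfCode2023 | Day14/Day14.py | tumble
-- ===== SOURCE A (Python) =====
-- def tumble(lines):
--     tilted = []
--     for line in lines:
--         line = list(line)
--         for i, char in enumerate(line):
--             if char == "O":
--                 for j in range(1, i + 1):
--                     if line[i - j] == ".":
--                         line[i - j], line[i - j + 1] = line[i - j + 1], line[i - j]
--                     else:
--                         break
--         tilted.append("".join(line))
--     return tilted
-- ===== SOURCE B (Python) =====
-- def tumble(lines):
--     tilted = []
--     for line in lines:
--         out = []
--         dots = 0
--         for c in line:
--             if c == ".":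
--                 dots += 1
--             elif c == "O":
--                 out.append("O")
--             else:
--                 out.append("." * dots)
--                 out.append(c)
--                 dots = 0
--         out.append("." * dots)
--         tilted.append("".join(out))
--     return tilted
-- ===== Notes on version B (the rewrite author's own statement) =====
-- stated objective: alternative
-- what changed: B replaces A's per-'O' inner bubbling loop (swapping each rock leftwards one cell at a time) by a single left-to-right pass per line that emits 'O's immediately and defers a run of pending dots, flushing them at each blocker.
import Mathlib
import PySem

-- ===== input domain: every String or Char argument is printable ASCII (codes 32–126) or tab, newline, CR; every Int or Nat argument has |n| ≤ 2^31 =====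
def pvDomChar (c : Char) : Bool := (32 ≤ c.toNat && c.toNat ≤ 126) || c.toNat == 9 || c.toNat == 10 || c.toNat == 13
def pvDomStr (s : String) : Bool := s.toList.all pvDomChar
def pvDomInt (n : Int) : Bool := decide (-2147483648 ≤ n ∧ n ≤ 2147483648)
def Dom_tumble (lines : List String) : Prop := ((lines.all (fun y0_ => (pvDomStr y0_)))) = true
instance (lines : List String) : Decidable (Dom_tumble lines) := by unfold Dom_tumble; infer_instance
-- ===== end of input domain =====

-- B tilts each line in a single left-to-right pass (emit 'O' at once, defer a run of pending
-- dots, flush them at each blocker) instead of A's per-'O' leftward bubbling loop (alternative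
-- decomposition; same measured cost).

-- ===== PORT A =====
-- Python's simultaneous swap: line[i-j], line[i-j+1] = line[i-j+1], line[i-j]
def pvSwap (l : List Char) (p : Nat) : List Char :=
  (l.set p (l.getD (p+1) ' ')).set (p+1) (l.getD p ' ')

-- inner `for j in range(1, i+1): … else: break` loop; A's indices are always in range
def pvBubble (l : List Char) (i j : Nat) : List Char :=
  if _h : j ≤ i then
    if l.getD (i - j) ' ' = '.' then pvBubble (pvSwap l (i - j)) i (j+1) else l
  else l
termination_by i + 1 - j

-- outer `for i, char in enumerate(line)` loop over the mutating list; n = remaining steps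
def pvOuterA (l : List Char) (i n : Nat) : List Char :=
  match n with
  | 0 => l
  | Nat.succ m => pvOuterA (if l.getD i ' ' = 'O' then pvBubble l i 1 else l) (i+1) m

def tumble (lines : List String) : List String :=
  lines.map (fun s => String.mk (pvOuterA s.toList 0 s.toList.length))

-- ===== PORT B =====
def pvStepB (st : List Char × Nat) (c : Char) : List Char × Nat :=
  if c = '.' then (st.1, st.2 + 1)
  else if c = 'O' then (st.1 ++ ['O'], st.2)
  else (st.1 ++ List.replicate st.2 '.' ++ [c], 0)

def tumble_alt (lines : List String) : List String :=
  lines.map (fun s =>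
    let p := s.toList.foldl pvStepB ([], 0)
    String.mk (p.1 ++ List.replicate p.2 '.'))

-- ===== PRECONDITION & SPEC =====
def Spec_tumble (lines : List String) (out : List String) : Prop := out = tumble_alt lines
instance (lines : List String) (out : List String) : Decidable (Spec_tumble lines out) := by unfold Spec_tumble; infer_instance

-- ===== CLAIM (what is proved, stated in full; the proofs are below) =====
def Claim_equal_tumble : Prop := ∀ (lines : List String), Dom_tumble lines → Spec_tumble lines (tumble lines)

-- ===== LEMMAS AND PROOFS =====

-- common recursive characterisation of one tilted line, with d pending dots
def pvF (d : Nat) (l : List Char) : List Char :=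
  match l with
  | [] => List.replicate d '.'
  | c :: t =>
    if c = '.' then pvF (d+1) t
    else if c = 'O' then 'O' :: pvF d t
    else List.replicate d '.' ++ c :: pvF 0 t

lemma pv_getD_len (xs ys : List Char) (d : Char) :
    (xs ++ ys).getD xs.length d = ys.getD 0 d := by
  induction xs with
  | nil => rfl
  | cons a t ih => simpa using ih

lemma pv_set_len (xs ys : List Char) (v : Char) :
    (xs ++ ys).set xs.length v = xs ++ ys.set 0 v := by
  induction xs with
  | nil => rfl
  | cons a t ih => simp [ih]

lemma pv_getD_len1 (xs ys : List Char) (d : Char) :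
    (xs ++ ys).getD (xs.length + 1) d = ys.getD 1 d := by
  induction xs with
  | nil => rfl
  | cons a t ih =>
    simp only [List.cons_append, List.length_cons, List.getD_cons_succ]
    exact ih

lemma pv_getD_append_lt (xs ys : List Char) (n : Nat) (h : n < xs.length) (d : Char) :
    (xs ++ ys).getD n d = xs.getD n d := by
  simp [List.getD, List.getElem?_append_left h]

lemma pv_set_len1 (xs ys : List Char) (v : Char) :
    (xs ++ ys).set (xs.length + 1) v = xs ++ ys.set 1 v := by
  induction xs with
  | nil => rfl
  | cons a t ih =>
    simp only [List.cons_append, List.length_cons, List.set_cons_succ]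
    rw [ih]

lemma pvSwap_mid (xs ys : List Char) (b c : Char) :
    pvSwap (xs ++ b :: c :: ys) xs.length = xs ++ c :: b :: ys := by
  unfold pvSwap
  rw [pv_getD_len1, pv_getD_len]
  show ((xs ++ b :: c :: ys).set xs.length c).set (xs.length + 1) b = _
  rw [pv_set_len]
  show ((xs ++ c :: c :: ys)).set (xs.length + 1) b = _
  rw [pv_set_len1]
  rfl

-- the "settled" prefix never ends with a free dot
def pvBlocked (out : List Char) : Prop := out.getLast? ≠ some '.'

lemma pvBubble_spec (d : Nat) : ∀ (k : Nat) (out t : List Char), pvBlocked out →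
    pvBubble (out ++ List.replicate d '.' ++ 'O' :: (List.replicate k '.' ++ t))
      (out.length + d + k) (k+1)
    = out ++ 'O' :: (List.replicate (d+k) '.' ++ t) := by
  induction d with
  | zero =>
    intro k out t hb
    cases out with
    | nil =>
      rw [pvBubble]
      simp
    | cons a o =>
      rw [pvBubble]
      have hle : k + 1 ≤ (a :: o).length + 0 + k := by simp
      have hidx : (a :: o).length + 0 + k - (k+1) = o.length := by simp; omega
      have hne : ((a :: o) ++ List.replicate 0 '.' ++ 'O' :: (List.replicate k '.' ++ t)).getD
          ((a :: o).length + 0 + k - (k + 1)) ' ' ≠ '.' := by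
        rw [hidx]
        have hrw : (a :: o) ++ List.replicate 0 '.' ++ 'O' :: (List.replicate k '.' ++ t)
            = (a :: o) ++ 'O' :: (List.replicate k '.' ++ t) := by simp
        rw [hrw, pv_getD_append_lt _ _ _ (by simp)]
        have h2 : (a :: o).getD o.length ' ' = (a :: o).getLast?.getD ' ' := by
          rw [List.getLast?_eq_getElem?]
          simp [List.getD]
        rw [h2]
        cases hlast : (a :: o).getLast? with
        | none => simp at hlast
        | some c =>
          have hc : c ≠ '.' := fun h => hb (by rw [hlast, h])
          simpa using hc
      rw [dif_pos hle, if_neg hne]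
      simp
  | succ d ih =>
    intro k out t hb
    have hrep : out ++ List.replicate (d+1) '.' ++ 'O' :: (List.replicate k '.' ++ t)
        = (out ++ List.replicate d '.') ++ '.' :: 'O' :: (List.replicate k '.' ++ t) := by
      simp [List.replicate_succ']
    rw [pvBubble, hrep]
    have hle : k + 1 ≤ out.length + (d+1) + k := by omega
    rw [dif_pos hle]
    have hidx : out.length + (d+1) + k - (k+1) = (out ++ List.replicate d '.').length := by
      simp; omega
    rw [hidx]
    have hget : ((out ++ List.replicate d '.') ++ '.' :: 'O' :: (List.replicate k '.' ++ t)).getD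
        (out ++ List.replicate d '.').length ' ' = '.' := by
      rw [pv_getD_len]; rfl
    rw [if_pos hget, pvSwap_mid]
    have hrep2 : (out ++ List.replicate d '.') ++ 'O' :: '.' :: (List.replicate k '.' ++ t)
        = out ++ List.replicate d '.' ++ 'O' :: (List.replicate (k+1) '.' ++ t) := by
      simp [List.replicate_succ]
    have harith : out.length + (d+1) + k = out.length + d + (k+1) := by omega
    rw [hrep2, harith, ih (k+1) out t hb]
    have h3 : d + (k+1) = d + 1 + k := by omega
    rw [h3]

lemma pvOuterA_spec : ∀ (rest out : List Char) (d : Nat), pvBlocked out →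
    pvOuterA (out ++ List.replicate d '.' ++ rest) (out.length + d) rest.length
      = out ++ pvF d rest := by
  intro rest
  induction rest with
  | nil => intro out d hb; simp [pvOuterA, pvF]
  | cons c t ih =>
    intro out d hb
    show pvOuterA _ _ (t.length + 1) = _
    rw [pvOuterA]
    have hsplit : out ++ List.replicate d '.' ++ c :: t
        = (out ++ List.replicate d '.') ++ c :: t := by simp
    have hlen : out.length + d = (out ++ List.replicate d '.').length := by simp
    have hget : (out ++ List.replicate d '.' ++ c :: t).getD (out.length + d) ' ' = c := by
      rw [hsplit, hlen, pv_getD_len]; rfl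
    rw [hget]
    by_cases hO : c = 'O'
    · subst hO
      rw [if_pos rfl]
      have hbub := pvBubble_spec d 0 out t hb
      simp only [List.replicate_zero, List.nil_append, Nat.add_zero] at hbub
      rw [hbub]
      have h1 : out ++ 'O' :: (List.replicate d '.' ++ t)
          = (out ++ ['O']) ++ List.replicate d '.' ++ t := by simp
      have h2 : out.length + d + 1 = (out ++ ['O']).length + d := by simp; omega
      have hb' : pvBlocked (out ++ ['O']) := by simp [pvBlocked]
      rw [h1, h2, ih (out ++ ['O']) d hb']
      rw [pvF, if_neg (by decide), if_pos rfl]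
      simp
    · by_cases hdot : c = '.'
      · subst hdot
        rw [if_neg (by decide)]
        have h1 : out ++ List.replicate d '.' ++ '.' :: t
            = out ++ List.replicate (d+1) '.' ++ t := by
          simp [List.replicate_succ']
        have h2 : out.length + d + 1 = out.length + (d+1) := by omega
        rw [h1, h2, ih out (d+1) hb]
        rw [pvF, if_pos rfl]
      · rw [if_neg hO]
        have h1 : out ++ List.replicate d '.' ++ c :: t
            = (out ++ List.replicate d '.' ++ [c]) ++ List.replicate 0 '.' ++ t := by simp
        have h2 : out.length + d + 1 = (out ++ List.replicate d '.' ++ [c]).length + 0 := by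
          simp; omega
        have hb' : pvBlocked (out ++ List.replicate d '.' ++ [c]) := by
          simp [pvBlocked]
          exact fun h => hdot h
        rw [h1, h2, ih _ 0 hb']
        rw [pvF, if_neg hdot, if_neg hO]
        simp

lemma pvFoldB_spec : ∀ (rest out : List Char) (d : Nat),
    (rest.foldl pvStepB (out, d)).1 ++ List.replicate (rest.foldl pvStepB (out, d)).2 '.'
      = out ++ pvF d rest := by
  intro rest
  induction rest with
  | nil => intro out d; simp [pvF]
  | cons c t ih =>
    intro out d
    rw [List.foldl_cons]
    by_cases hdot : c = '.'
    · subst hdot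
      show (t.foldl pvStepB (pvStepB (out, d) '.')).1 ++ _ = _
      rw [show pvStepB (out, d) '.' = (out, d+1) from by simp [pvStepB]]
      rw [ih out (d+1), pvF, if_pos rfl]
    · by_cases hO : c = 'O'
      · subst hO
        rw [show pvStepB (out, d) 'O' = (out ++ ['O'], d) from by simp [pvStepB]]
        rw [ih (out ++ ['O']) d, pvF, if_neg (by decide), if_pos rfl]
        simp
      · rw [show pvStepB (out, d) c = (out ++ List.replicate d '.' ++ [c], 0) from by
          simp [pvStepB, hdot, hO]]
        rw [ih _ 0, pvF, if_neg hdot, if_neg hO]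
        simp

-- ===== VERDICT (by name: the statement is the Claim_ definition above) =====
theorem tumble_spec : Claim_equal_tumble := by
  intro lines _
  unfold Spec_tumble tumble tumble_alt
  refine List.map_congr_left ?_
  intro s _
  have h1 := pvOuterA_spec s.toList [] 0 (by simp [pvBlocked])
  simp only [List.nil_append, List.replicate_zero, List.length_nil, Nat.add_zero] at h1
  have h2 := pvFoldB_spec s.toList [] 0
  simp only [List.nil_append] at h2
  rw [h1, ← h2]
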